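-- pv_equiv track=rewrite | github.com/zhenfelix/OnlineJudgeCodings | LeetCode/面试题/面试题 08.13. 堆箱子.py | pileBox
-- ===== SOURCE A (Python) =====
-- from typing import List
--
-- class BIT:
--     def __init__(self,n,m):
--         self.tree = [[0]*(m+1) for _ in range(n+1)]
--         self.n, self.m = n, m
--
--     def query(self,qx,qy):
--         res = 0
--         x = qx
--         while x:
--             y = qy
--             while y:
--                 res = max(res, self.tree[x][y])
--                 y -= y&(-y)
--             x -= x&(-x)
--         return res
--
--     def update(self,qx,qy,val):
--         n, m = self.n, self.m
--         x = qx
--         while x <= n: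
--             y = qy
--             while y <= m:
--                 self.tree[x][y] = max(self.tree[x][y], val)
--                 y += y&(-y)
--             x += x&(-x)
--
-- def pileBox(box: List[List[int]]) -> int:
--     box.sort(key=lambda x: (x[-1],-x[0],-x[1]))
--     w2id, d2id = {}, {}
--     ws = sorted(list(set([w for w,_,_ in box])))
--     for i, w in enumerate(ws,1):
--         w2id[w] = i
--     ds = sorted(list(set([d for _,d,_ in box])))
--     for i, d in enumerate(ds,1):
--         d2id[d] = i
--     n, m = len(ws), len(ds)
--     T = BIT(n,m)
--     res = 0
--     for w,d,h in box:
--         hsum = T.query(w2id[w]-1,d2id[d]-1)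
--         T.update(w2id[w],d2id[d],hsum+h)
--         res = max(res,hsum+h)
--     return res
-- ===== SOURCE B (Python) =====
-- from typing import List
--
-- def pileBox(box: List[List[int]]) -> int:
--     # Classic O(n^2) longest-chain DP; sorts `box` in place with the same key as the original.
--     box.sort(key=lambda x: (x[-1], -x[0], -x[1]))
--     chains = []   # (w, d, best chain height ending with this box)
--     res = 0
--     for w, d, h in box:
--         best = 0
--         for wj, dj, vj in chains:
--             if wj < w and dj < d and vj > best:
--                 best = vj
--         chains.append((w, d, best + h))
--         if best + h > res:
--             res = best + h
--     return res
-- ===== Notes on version B (the rewrite author's own statement) =====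
-- stated objective: simpler
-- what changed: B replaces A's coordinate compression plus 2D max-Fenwick (BIT) machinery by the classic quadratic longest-chain DP: after the identical in-place sort it scans, for each box, all earlier boxes with strictly smaller width and depth and keeps the best chain value, so the dictionaries and the Fenwick tree disappear.
import Mathlib
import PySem

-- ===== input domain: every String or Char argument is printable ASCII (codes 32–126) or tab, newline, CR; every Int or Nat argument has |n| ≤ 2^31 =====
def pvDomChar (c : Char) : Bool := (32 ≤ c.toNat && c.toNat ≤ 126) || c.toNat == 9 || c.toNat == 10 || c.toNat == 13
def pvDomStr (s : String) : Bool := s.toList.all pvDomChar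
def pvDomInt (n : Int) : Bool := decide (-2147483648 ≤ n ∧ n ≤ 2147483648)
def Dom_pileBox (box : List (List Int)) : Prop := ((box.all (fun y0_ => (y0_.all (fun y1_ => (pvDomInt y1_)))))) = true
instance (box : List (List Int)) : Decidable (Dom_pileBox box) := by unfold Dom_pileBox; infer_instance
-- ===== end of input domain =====

-- B replaces A's coordinate-compressed 2D Fenwick (BIT) maximum structure by the classic
-- O(n²) longest-chain DP over the list sorted with the same key; same return value on Pre_.
-- (Python A and B both sort the argument list in place with the identical key, so the
-- observable mutation agrees; the equivalence proved here is about the return value.)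

-- ===== PORT A =====

-- x & (-x), the lowbit of x (PySem.Int.band is Python-exact `&`)
def lowb (x : Int) : Int := PySem.Int.band x (-x)

-- termination helper for the BIT loops (cited in decreasing_by)
lemma lowb_pos_le (x : Int) (h : 0 < x) : 0 < lowb x ∧ lowb x ≤ x := by
  unfold lowb PySem.Int.band
  have h1 : (0:Int) ≤ x := by omega
  have h2 : ¬ (0:Int) ≤ -x := by omega
  rw [if_pos h1, if_neg h2]
  have := Nat.and_le_right (n := x.toNat) (m := (-(-x) - 1).toNat)
  omega

-- `while y:` of BIT.query; y stays ≥ 0 on every call made by pileBox, so the loop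
-- condition is ported as 0 < y (for y < 0 the Python loop would not terminate).
def bitQueryY (tree : List (List Int)) (x y res : Int) : Int :=
  if 0 < y then
    bitQueryY tree x (y - lowb y)
      (max res (PySem.List.pyGetD (PySem.List.pyGetD tree x []) y 0))
  else res
termination_by y.toNat
decreasing_by have := lowb_pos_le y (by assumption); omega

-- `while x:` of BIT.query
def bitQueryX (tree : List (List Int)) (qy x res : Int) : Int :=
  if 0 < x then bitQueryX tree qy (x - lowb x) (bitQueryY tree x qy res) else res
termination_by x.toNat
decreasing_by have := lowb_pos_le x (by assumption); omega

def bitQuery (tree : List (List Int)) (qx qy : Int) : Int := bitQueryX tree qy qx 0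

-- inner `while y <= m:` of BIT.update, acting on row tree[x] (0 < y is a totality
-- guard only: update is always called with y ≥ 1, and y only grows)
def bitUpdateY (row : List Int) (m y val : Int) : List Int :=
  if h : 0 < y ∧ y ≤ m then
    bitUpdateY (PySem.List.pySetD row y (max (PySem.List.pyGetD row y 0) val)) m (y + lowb y) val
  else row
termination_by (m + 1 - y).toNat
decreasing_by have := lowb_pos_le y h.1; omega

-- outer `while x <= n:` of BIT.update (0 < x again a totality guard)
def bitUpdateX (tree : List (List Int)) (n m x qy val : Int) : List (List Int) :=
  if h : 0 < x ∧ x ≤ n then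
    bitUpdateX (PySem.List.pySetD tree x (bitUpdateY (PySem.List.pyGetD tree x []) m qy val))
      n m (x + lowb x) qy val
  else tree
termination_by (n + 1 - x).toNat
decreasing_by have := lowb_pos_le x h.1; omega

-- the sort key lambda x: (x[-1], -x[0], -x[1]); the int triple is kept as a 3-element
-- list, whose `<` is exactly Python's lexicographic tuple comparison
def tkey (x : List Int) : List Int :=
  [PySem.List.pyGetD x (-1) 0, -(PySem.List.pyGetD x 0 0), -(PySem.List.pyGetD x 1 0)]

def pileBox (box : List (List Int)) : Int :=
  let sbox := PySem.List.sorted box tkey false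
  let ws := PySem.List.sorted (PySem.Set.ofList (sbox.map (fun b => PySem.List.pyGetD b 0 0)))
    (fun x => x) false
  let w2id := (PySem.List.enumerate ws 1).foldl
    (fun d p => PySem.Dict.insert d p.2 p.1) PySem.Dict.empty
  let ds := PySem.List.sorted (PySem.Set.ofList (sbox.map (fun b => PySem.List.pyGetD b 1 0)))
    (fun x => x) false
  let d2id := (PySem.List.enumerate ds 1).foldl
    (fun d p => PySem.Dict.insert d p.2 p.1) PySem.Dict.empty
  let n : Int := ws.length
  let m : Int := ds.length
  let tree0 := (PySem.List.pyRange 0 (n+1) 1).map (fun _ => PySem.List.pyRepeat [(0:Int)] (m+1))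
  let st := sbox.foldl (fun (st : List (List Int) × Int) b =>
    let w := PySem.List.pyGetD b 0 0
    let d := PySem.List.pyGetD b 1 0
    let h := PySem.List.pyGetD b 2 0
    let hsum := bitQuery st.1 (PySem.Dict.getD w2id w 0 - 1) (PySem.Dict.getD d2id d 0 - 1)
    (bitUpdateX st.1 n m (PySem.Dict.getD w2id w 0) (PySem.Dict.getD d2id d 0) (hsum + h),
      max st.2 (hsum + h))) (tree0, 0)
  st.2

-- ===== PORT B =====

def pileBox_alt (box : List (List Int)) : Int :=
  let sbox := PySem.List.sorted box tkey false
  let st := sbox.foldl (fun (st : List (Int × Int × Int) × Int) b =>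
    let w := PySem.List.pyGetD b 0 0
    let d := PySem.List.pyGetD b 1 0
    let h := PySem.List.pyGetD b 2 0
    let best := st.1.foldl
      (fun best c => if c.1 < w ∧ c.2.1 < d ∧ best < c.2.2 then c.2.2 else best) 0
    (st.1 ++ [(w, d, best + h)], if st.2 < best + h then best + h else st.2)) ([], 0)
  st.2

-- ===== PRECONDITION & SPEC =====
-- Pre_ excludes exactly the inputs on which Python A raises: a box entry that is not a
-- 3-element list (IndexError on x[-1] / ValueError when unpacking `for w,d,h in box`);
-- Python B raises on the same inputs.
def Pre_pileBox (box : List (List Int)) : Prop := ∀ l ∈ box, l.length = 3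
instance (box : List (List Int)) : Decidable (Pre_pileBox box) := by
  unfold Pre_pileBox; infer_instance

def pvWitness_pileBox : List (List Int) := [[1, 2, 3], [2, 3, 4], [1, 1, 1]]

def Spec_pileBox (box : List (List Int)) (out : Int) : Prop := out = pileBox_alt box
instance (box : List (List Int)) (out : Int) : Decidable (Spec_pileBox box out) := by
  unfold Spec_pileBox; infer_instance

-- ===== CLAIM (what is proved, stated in full; the proofs are below) =====
def Claim_equal_pileBox : Prop :=
  ∀ (box : List (List Int)), Dom_pileBox box → Pre_pileBox box → Spec_pileBox box (pileBox box)

-- ===== LEMMAS AND PROOFS =====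

-- ---- lowbit arithmetic (Nat side) ----

def nlow (n : Nat) : Nat := n - (n &&& (n-1))

lemma and_pred_odd (s : Nat) : (2*s+1) &&& (2*s) = 2*s := by
  apply Nat.eq_of_testBit_eq; intro i
  cases i with
  | zero => simp [Nat.testBit_zero]
  | succ i =>
    simp only [Nat.testBit_succ, Nat.and_div_two]
    rw [show (2*s+1)/2 = s by omega, show (2*s)/2 = s by omega]
    simp

lemma and_pred_even (m : Nat) (h : 0 < m) : (2*m) &&& (2*m-1) = 2*(m &&& (m-1)) := by
  apply Nat.eq_of_testBit_eq; intro i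
  cases i with
  | zero => simp [Nat.testBit_zero]
  | succ i =>
    simp only [Nat.testBit_succ, Nat.and_div_two]
    rw [show (2*m)/2 = m by omega, show (2*m-1)/2 = m-1 by omega,
      show 2*(m &&& (m-1))/2 = m &&& (m-1) by omega]

lemma nlow_odd (s : Nat) : nlow (2*s+1) = 1 := by
  unfold nlow; rw [show 2*s+1-1 = 2*s by omega, and_pred_odd]; omega

lemma nlow_even (m : Nat) (h : 0 < m) : nlow (2*m) = 2 * nlow m := by
  unfold nlow; rw [and_pred_even m h]
  have := Nat.and_le_right (n := m) (m := m-1)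
  omega

lemma nlow_pow_mul (k s : Nat) : nlow (2^k * (2*s+1)) = 2^k := by
  induction k with
  | zero => simpa using nlow_odd s
  | succ k ih =>
    have h1 : 2^(k+1) * (2*s+1) = 2 * (2^k * (2*s+1)) := by ring
    have h2 : 0 < 2^k * (2*s+1) := by positivity
    rw [h1, nlow_even _ h2, ih]; ring

lemma nat_window (c a : Nat) (hc : 0 < c) (h1 : c - nlow c < a) (h2 : a < c) :
    a + nlow a ≤ c := by
  obtain ⟨k, cm, hodd, hck⟩ := Nat.exists_eq_two_pow_mul_odd (show c ≠ 0 by omega)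
  obtain ⟨s, hs⟩ := hodd
  subst hs
  have hnc : nlow c = 2^k := by rw [hck, nlow_pow_mul]
  have hcq : c = 2*(2^k*s) + 2^k := by rw [hck]; ring
  have hr0 : 0 < a - 2*(2^k*s) := by omega
  set r := a - 2*(2^k*s) with hrdef
  have hrlt : r < 2^k := by omega
  obtain ⟨j, rm, hrodd, hrj⟩ := Nat.exists_eq_two_pow_mul_odd (show r ≠ 0 by omega)
  obtain ⟨t, ht⟩ := hrodd
  subst ht
  have hjk : j < k := by
    have h2j : 2^j ≤ r := by rw [hrj]; nlinarith [Nat.pos_of_ne_zero (show 2*t+1 ≠ 0 by omega)]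
    have : (2:Nat)^j < 2^k := lt_of_le_of_lt h2j hrlt
    exact (Nat.pow_lt_pow_iff_right (by norm_num)).mp this
  obtain ⟨u, rfl⟩ : ∃ u, k = j + u + 1 := ⟨k-j-1, by omega⟩
  have hnla : nlow a = 2^j := by
    have ha : a = 2^j * (2*(2^u*2*s + t) + 1) := by
      have : a = 2*(2^(j+u+1)*s) + 2^j*(2*t+1) := by omega
      rw [this]; ring
    rw [ha, nlow_pow_mul]
  have htk : 2*t+1 < 2*2^u := by
    have h' : 2^j * (2*t+1) < 2^j * (2*2^u) := by
      rw [← hrj]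
      calc r < 2^(j+u+1) := hrlt
        _ = 2^j * (2*2^u) := by ring
    exact Nat.lt_of_mul_lt_mul_left h'
  have hfin : r + 2^j ≤ 2^(j+u+1) := by
    calc r + 2^j = 2^j * (2*t+2) := by rw [hrj]; ring
      _ ≤ 2^j * (2*2^u) := Nat.mul_le_mul_left _ (by omega)
      _ = 2^(j+u+1) := by ring
  omega

-- ---- lowbit arithmetic (Int side) ----

lemma lowb_natCast (n : Nat) (h : 0 < n) :
    lowb (n : Int) = ((nlow n : Nat) : Int) := by
  unfold lowb PySem.Int.band nlow
  have h1 : (0:Int) ≤ (n:Int) := by positivity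
  have h2 : ¬ (0:Int) ≤ -(n:Int) := by omega
  rw [if_pos h1, if_neg h2]
  have e1 : (-(-(n:Int)) - 1).toNat = n - 1 := by omega
  have e2 : ((n:Int)).toNat = n := by omega
  rw [e1, e2]

lemma window (c a : Int) (hc : 0 < c) (h1 : c - lowb c < a) (h2 : a < c) :
    a + lowb a ≤ c := by
  obtain ⟨cn, rfl⟩ : ∃ k : Nat, c = (k:Int) := ⟨c.toNat, by omega⟩
  have hcn : 0 < cn := by exact_mod_cast hc
  rw [lowb_natCast cn hcn] at h1
  have hnle : nlow cn ≤ cn := Nat.sub_le _ _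
  obtain ⟨an, rfl⟩ : ∃ k : Nat, a = (k:Int) := ⟨a.toNat, by omega⟩
  have han : 0 < an := by omega
  rw [lowb_natCast an han]
  have := nat_window cn an hcn (by omega) (by exact_mod_cast h2)
  omega

-- ---- query / update paths ----

def downL (q : Int) : List Int :=
  if 0 < q then q :: downL (q - lowb q) else []
termination_by q.toNat
decreasing_by have := lowb_pos_le q (by assumption); omega

def upL (n a : Int) : List Int :=
  if h : 0 < a ∧ a ≤ n then a :: upL n (a + lowb a) else []
termination_by (n + 1 - a).toNat
decreasing_by have := lowb_pos_le a h.1; omega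

lemma mem_downL (q x : Int) (hx : x ∈ downL q) : 0 < x ∧ x ≤ q := by
  induction q using downL.induct with
  | case1 q h ih =>
    rw [downL, if_pos h] at hx
    rcases List.mem_cons.mp hx with rfl | hx'
    · omega
    · have := ih hx'
      have := lowb_pos_le q h
      omega
  | case2 q h =>
    rw [downL, if_neg h] at hx
    simp at hx

lemma mem_upL (n a x : Int) (hx : x ∈ upL n a) : a ≤ x ∧ x ≤ n := by
  induction a using upL.induct n with
  | case1 a h ih =>
    rw [upL, dif_pos h] at hx
    rcases List.mem_cons.mp hx with rfl | hx'
    · omega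
    · have := ih hx'
      have := lowb_pos_le a h.1
      omega
  | case2 a h =>
    rw [upL, dif_neg h] at hx
    simp at hx

lemma upL_reach (n c : Int) (hcn : c ≤ n) :
    ∀ (a : Int), 0 < a → a ≤ c → c - lowb c < a → c ∈ upL n a := by
  intro a
  generalize hk : (c - a).toNat = k
  induction k using Nat.strong_induction_on generalizing a with
  | _ k ih =>
    intro ha hac hw
    rw [upL, dif_pos ⟨ha, le_trans hac hcn⟩]
    rcases eq_or_lt_of_le hac with rfl | hlt
    · exact List.mem_cons_self
    · have hla := lowb_pos_le a ha
      have hstep : a + lowb a ≤ c := window c a (by omega) hw hlt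
      refine List.mem_cons_of_mem _ ?_
      exact ih (c - (a + lowb a)).toNat (by omega) (a + lowb a) rfl (by omega) hstep (by omega)

lemma meet_exists (n a q : Int) (ha : 1 ≤ a) (han : a ≤ n) (hqn : q ≤ n) (haq : a ≤ q) :
    ∃ x, x ∈ downL q ∧ x ∈ upL n a := by
  generalize hk : q.toNat = k
  induction k using Nat.strong_induction_on generalizing q with
  | _ k ih =>
    have hq : 0 < q := by omega
    have hlq := lowb_pos_le q hq
    rw [downL, if_pos hq]
    by_cases hcase : q - lowb q < a
    · exact ⟨q, List.mem_cons_self, upL_reach n q hqn a (by omega) haq hcase⟩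
    · obtain ⟨x, hx1, hx2⟩ := ih (q - lowb q).toNat (by omega) (q - lowb q)
        (by omega) (by omega) rfl
      exact ⟨x, List.mem_cons_of_mem _ hx1, hx2⟩

-- ---- generic fold bounds ----

lemma foldl_bound {α : Type} (l : List α) (g : Int → α → Int) (init c : Int)
    (h0 : init ≤ c) (hstep : ∀ r v, r ≤ c → v ∈ l → g r v ≤ c) :
    l.foldl g init ≤ c := by
  induction l generalizing init with
  | nil => exact h0
  | cons a t ih =>
    exact ih _ (hstep init a h0 (by simp)) (fun r v hr hv => hstep r v hr (by simp [hv]))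

lemma le_foldl_mono {α : Type} (l : List α) (g : Int → α → Int)
    (hmono : ∀ r v, r ≤ g r v) (init : Int) : init ≤ l.foldl g init := by
  induction l generalizing init with
  | nil => simp
  | cons a t ih => exact le_trans (hmono init a) (ih _)

lemma foldl_attains {α : Type} (l : List α) (g : Int → α → Int) (f : α → Int)
    (hmono : ∀ r v, r ≤ g r v) (hf : ∀ r v, f v ≤ g r v) (init : Int) :
    ∀ v ∈ l, f v ≤ l.foldl g init := by
  induction l generalizing init with
  | nil => simp
  | cons a t ih =>
    intro v hv
    rcases List.mem_cons.mp hv with rfl | hv'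
    · exact le_trans (hf init v) (le_foldl_mono t g hmono _)
    · exact ih _ v hv'

-- ---- cells, invariant ----

def cellI (tree : List (List Int)) (x y : Int) : Int :=
  PySem.List.pyGetD (PySem.List.pyGetD tree x []) y 0

def touchVals (n m : Int) (C : List (Int × Int × Int)) (x y : Int) : List Int :=
  (C.filter (fun e => decide (x ∈ upL n e.1) && decide (y ∈ upL m e.2.1))).map (fun e => e.2.2)

def TInv (n m : Int) (tree : List (List Int)) (C : List (Int × Int × Int)) : Prop :=
  ∀ x y : Int, 0 < x → 0 < y →
    cellI tree x y = (touchVals n m C x y).foldl max 0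

def TShape (n m : Int) (tree : List (List Int)) : Prop :=
  n + 1 ≤ (tree.length : Int) ∧ ∀ row ∈ tree, m + 1 ≤ (row.length : Int)

-- pyGetD/pySetD at distinct nonnegative indices
lemma pyGetD_pySetD_ne {α : Type} (l : List α) (i z : Int) (v d : α)
    (hi : 0 ≤ i) (hz : 0 ≤ z) (hne : z ≠ i) :
    PySem.List.pyGetD (PySem.List.pySetD l i v) z d = PySem.List.pyGetD l z d := by
  obtain ⟨zn, rfl⟩ : ∃ k : Nat, z = (k:Int) := ⟨z.toNat, by omega⟩
  rw [PySem.List.pySetD_of_nonneg _ _ hi, PySem.List.pyGetD_natCast, PySem.List.pyGetD_natCast]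
  simp [List.getD_eq_getElem?_getD, List.getElem?_set_ne (show i.toNat ≠ zn by omega)]

lemma pyGetD_pySetD_self {α : Type} (l : List α) (i : Int) (v d : α)
    (hi : 0 ≤ i) (hr : i < (l.length : Int)) :
    PySem.List.pyGetD (PySem.List.pySetD l i v) i d = v := by
  obtain ⟨n, rfl⟩ : ∃ k : Nat, i = (k:Int) := ⟨i.toNat, by omega⟩
  rw [PySem.List.pySetD_of_nonneg _ _ hi, PySem.List.pyGetD_natCast]
  simp [List.getD_eq_getElem?_getD, (show n < l.length by omega)]

lemma bitUpdateY_len (row : List Int) (m y val : Int) :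
    (bitUpdateY row m y val).length = row.length := by
  fun_induction bitUpdateY with
  | case1 row y h ih => rw [ih, PySem.List.length_pySetD]
  | case2 => rfl

lemma bitUpdateY_get (row : List Int) (m y val : Int) :
    m + 1 ≤ (row.length : Int) → 0 < y →
    ∀ z : Int, 0 < z →
      PySem.List.pyGetD (bitUpdateY row m y val) z 0 =
        if z ∈ upL m y then max (PySem.List.pyGetD row z 0) val
        else PySem.List.pyGetD row z 0 := by
  fun_induction bitUpdateY with
  | case1 row y h ih =>
    intro hlen hy z hz
    have hlb := lowb_pos_le y h.1
    have ih' := ih (by rw [PySem.List.length_pySetD]; exact hlen) (by omega) z hz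
    rw [ih']
    have hunf : upL m y = y :: upL m (y + lowb y) := by rw [upL, dif_pos h]
    rw [hunf]
    by_cases hzy : z = y
    · subst hzy
      have hnot : z ∉ upL m (z + lowb z) := fun hmem => by
        have := mem_upL m (z + lowb z) z hmem; omega
      rw [if_neg hnot, if_pos List.mem_cons_self]
      exact pyGetD_pySetD_self row z _ 0 (by omega) (by omega)
    · rw [pyGetD_pySetD_ne row y z _ 0 (by omega) (by omega) hzy]
      by_cases hzt : z ∈ upL m (y + lowb y)
      · rw [if_pos hzt, if_pos (List.mem_cons_of_mem _ hzt)]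
      · rw [if_neg hzt, if_neg (by simp [List.mem_cons, hzy, hzt])]
  | case2 row y h =>
    intro hlen hy z hz
    have hunf : upL m y = [] := by rw [upL, dif_neg h]
    rw [hunf, if_neg (List.not_mem_nil)]

lemma bitUpdateX_char (tree : List (List Int)) (n m x qy val : Int) :
    TShape n m tree → 0 < x → 0 < qy →
    TShape n m (bitUpdateX tree n m x qy val) ∧
    ∀ z w : Int, 0 < z → 0 < w →
      cellI (bitUpdateX tree n m x qy val) z w =
        if z ∈ upL n x ∧ w ∈ upL m qy then max (cellI tree z w) val
        else cellI tree z w := by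
  fun_induction bitUpdateX with
  | case1 tree x h ih =>
    intro hSh hx hqy
    obtain ⟨hlen, hrows⟩ := hSh
    have hlb := lowb_pos_le x h.1
    have hrowmem : PySem.List.pyGetD tree x [] ∈ tree :=
      PySem.List.pyGetD_mem tree [] (by simp [PySem.Raise.InRange]; omega)
    have hrl : m + 1 ≤ ((PySem.List.pyGetD tree x []).length : Int) := hrows _ hrowmem
    have hrl' := bitUpdateY_len (PySem.List.pyGetD tree x []) m qy val
    have hSh1 : TShape n m (PySem.List.pySetD tree x
        (bitUpdateY (PySem.List.pyGetD tree x []) m qy val)) := by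
      constructor
      · rw [PySem.List.length_pySetD]; exact hlen
      · intro row hrm
        rw [PySem.List.pySetD_of_nonneg _ _ (by omega : (0:Int) ≤ x)] at hrm
        rcases List.mem_or_eq_of_mem_set hrm with hrm' | rfl
        · exact hrows _ hrm'
        · rw [hrl']; exact hrl
    obtain ⟨hSh2, hcell⟩ := ih hSh1 (by omega) hqy
    refine ⟨hSh2, ?_⟩
    intro z w hz hw
    rw [hcell z w hz hw]
    have hunf : upL n x = x :: upL n (x + lowb x) := by rw [upL, dif_pos h]
    rw [hunf]
    have hc1 : ∀ w' : Int, 0 < w' →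
        cellI (PySem.List.pySetD tree x (bitUpdateY (PySem.List.pyGetD tree x []) m qy val)) z w' =
          if z = x ∧ w' ∈ upL m qy then max (cellI tree z w') val else cellI tree z w' := by
      intro w' hw'
      by_cases hzx : z = x
      · subst hzx
        unfold cellI
        rw [pyGetD_pySetD_self tree z _ [] (by omega) (by omega)]
        rw [bitUpdateY_get _ m qy val hrl hqy w' hw']
        by_cases hB : w' ∈ upL m qy
        · rw [if_pos hB, if_pos ⟨rfl, hB⟩]
        · rw [if_neg hB, if_neg (by tauto)]
      · unfold cellI
        rw [pyGetD_pySetD_ne tree x z _ [] (by omega) (by omega) hzx]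
        rw [if_neg (by tauto)]
    by_cases hzx : z = x
    · subst hzx
      have hzt : z ∉ upL n (z + lowb z) := fun hmem => by
        have := mem_upL n (z + lowb z) z hmem; omega
      rw [if_neg (by tauto)]
      rw [hc1 w hw]
      by_cases hB : w ∈ upL m qy
      · rw [if_pos ⟨rfl, hB⟩, if_pos ⟨List.mem_cons_self, hB⟩]
      · rw [if_neg (by tauto), if_neg (by tauto)]
    · by_cases hA : z ∈ upL n (x + lowb x) <;> by_cases hB : w ∈ upL m qy
      · rw [if_pos ⟨hA, hB⟩, hc1 w hw, if_neg (by tauto),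
          if_pos ⟨List.mem_cons_of_mem _ hA, hB⟩]
      · rw [if_neg (by tauto), hc1 w hw, if_neg (by tauto), if_neg (by tauto)]
      · rw [if_neg (by tauto), hc1 w hw, if_neg (by tauto),
          if_neg (by simp [List.mem_cons, hzx, hA])]
      · rw [if_neg (by tauto), hc1 w hw, if_neg (by tauto), if_neg (by tauto)]
  | case2 tree x h =>
    intro hSh hx hqy
    refine ⟨hSh, ?_⟩
    intro z w hz hw
    have hunf : upL n x = [] := by rw [upL, dif_neg h]
    rw [hunf, if_neg (by simp)]

lemma TInv_update (n m : Int) (tree : List (List Int)) (C : List (Int × Int × Int))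
    (a b v : Int) (hInv : TInv n m tree C) (hSh : TShape n m tree)
    (ha : 0 < a) (hb : 0 < b) :
    TInv n m (bitUpdateX tree n m a b v) (C ++ [(a, b, v)]) ∧
    TShape n m (bitUpdateX tree n m a b v) := by
  obtain ⟨hSh', hcell⟩ := bitUpdateX_char tree n m a b v hSh ha hb
  refine ⟨?_, hSh'⟩
  intro x y hx hy
  rw [hcell x y hx hy]
  unfold touchVals
  rw [List.filter_append, List.map_append]
  by_cases hT : x ∈ upL n a ∧ y ∈ upL m b
  · rw [if_pos hT]
    have hf : List.filter (fun e => decide (x ∈ upL n e.1) && decide (y ∈ upL m e.2.1))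
        [((a, b, v) : Int × Int × Int)] = [(a, b, v)] := by
      simp [hT.1, hT.2]
    rw [hf, hInv x y hx hy, List.foldl_append]
    unfold touchVals
    simp
  · rw [if_neg hT]
    have hf : List.filter (fun e => decide (x ∈ upL n e.1) && decide (y ∈ upL m e.2.1))
        [((a, b, v) : Int × Int × Int)] = [] := by
      simp only [List.filter_cons, List.filter_nil, Bool.and_eq_true, decide_eq_true_eq]
      rw [if_neg hT]
    rw [hf, hInv x y hx hy, List.foldl_append]
    unfold touchVals
    simp

-- ---- query characterisation ----

lemma bitQueryY_eq (tree : List (List Int)) (x y res : Int) :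
    bitQueryY tree x y res = (downL y).foldl (fun r yy => max r (cellI tree x yy)) res := by
  fun_induction bitQueryY with
  | case1 y res h ih =>
    rw [ih]
    have hunf : downL y = y :: downL (y - lowb y) := by rw [downL, if_pos h]
    rw [hunf, List.foldl_cons]
    rfl
  | case2 y res h =>
    have hunf : downL y = [] := by rw [downL, if_neg h]
    rw [hunf, List.foldl_nil]

lemma bitQueryX_eq (tree : List (List Int)) (qy x res : Int) :
    bitQueryX tree qy x res =
      (downL x).foldl
        (fun r xx => (downL qy).foldl (fun r yy => max r (cellI tree xx yy)) r) res := by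
  fun_induction bitQueryX with
  | case1 x res h ih =>
    rw [ih]
    have hunf : downL x = x :: downL (x - lowb x) := by rw [downL, if_pos h]
    rw [hunf, List.foldl_cons, bitQueryY_eq]
  | case2 x res h =>
    have hunf : downL x = [] := by rw [downL, if_neg h]
    rw [hunf, List.foldl_nil]

lemma query_val (n m : Int) (tree : List (List Int)) (C : List (Int × Int × Int))
    (qx qy : Int) (hInv : TInv n m tree C)
    (hCb : ∀ e ∈ C, 1 ≤ e.1 ∧ e.1 ≤ n ∧ 1 ≤ e.2.1 ∧ e.2.1 ≤ m)
    (hqx : qx ≤ n) (hqy : qy ≤ m) :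
    bitQuery tree qx qy =
      ((C.filter (fun e => decide (e.1 ≤ qx) && decide (e.2.1 ≤ qy))).map
        (fun e => e.2.2)).foldl max 0 := by
  apply le_antisymm
  · unfold bitQuery
    rw [bitQueryX_eq]
    apply foldl_bound
    · exact le_foldl_mono _ _ (fun r v => le_max_left _ _) 0
    · intro r xx hr hxx
      apply foldl_bound
      · exact hr
      · intro r' yy hr' hyy
        apply max_le hr'
        have hx := mem_downL qx xx hxx
        have hy := mem_downL qy yy hyy
        rw [hInv xx yy hx.1 hy.1]
        apply foldl_bound
        · exact le_foldl_mono _ _ (fun r v => le_max_left _ _) 0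
        · intro r'' v hr'' hv
          apply max_le hr''
          unfold touchVals at hv
          obtain ⟨e, he, rfl⟩ := List.mem_map.mp hv
          obtain ⟨heC, hcond⟩ := List.mem_filter.mp he
          simp only [Bool.and_eq_true, decide_eq_true_eq] at hcond
          have h1 := mem_upL n e.1 xx hcond.1
          have h2 := mem_upL m e.2.1 yy hcond.2
          apply foldl_attains _ max (fun v => v) (fun r v => le_max_left _ _)
            (fun r v => le_max_right _ _) 0
          exact List.mem_map_of_mem (List.mem_filter.mpr ⟨heC, by
            simp only [Bool.and_eq_true, decide_eq_true_eq]
            exact ⟨by omega, by omega⟩⟩)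
  · apply foldl_bound
    · unfold bitQuery
      rw [bitQueryX_eq]
      exact le_foldl_mono _ _ (fun r xx => le_foldl_mono _ _ (fun r' yy => le_max_left _ _) r) 0
    · intro r v hr hv
      apply max_le hr
      obtain ⟨e, he, rfl⟩ := List.mem_map.mp hv
      obtain ⟨heC, hcond⟩ := List.mem_filter.mp he
      simp only [Bool.and_eq_true, decide_eq_true_eq] at hcond
      obtain ⟨hb1, hb2, hb3, hb4⟩ := hCb e heC
      obtain ⟨xx, hxd, hxu⟩ := meet_exists n e.1 qx hb1 hb2 hqx hcond.1
      obtain ⟨yy, hyd, hyu⟩ := meet_exists m e.2.1 qy hb3 hb4 hqy hcond.2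
      have hx := mem_downL qx xx hxd
      have hy := mem_downL qy yy hyd
      have hcell : e.2.2 ≤ cellI tree xx yy := by
        rw [hInv xx yy hx.1 hy.1]
        apply foldl_attains _ max (fun v => v) (fun r v => le_max_left _ _)
          (fun r v => le_max_right _ _) 0
        unfold touchVals
        exact List.mem_map_of_mem (List.mem_filter.mpr ⟨heC, by
          simp only [Bool.and_eq_true, decide_eq_true_eq]
          exact ⟨hxu, hyu⟩⟩)
      unfold bitQuery
      rw [bitQueryX_eq]
      refine le_trans hcell (foldl_attains (downL qx) _ (fun xx' => cellI tree xx' yy)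
        (fun r v => le_foldl_mono _ _ (fun r' y' => le_max_left _ _) r)
        (fun r v => foldl_attains (downL qy) _ (fun y' => cellI tree v y')
          (fun a b => le_max_left _ _) (fun a b => le_max_right _ _) r yy hyd) 0 xx hxd)

-- ---- dictionary / rank ----

lemma dict_fold_pres (l : List (Int × Int)) (d0 : PySem.Dict Int Int) (w : Int)
    (h : ∀ p ∈ l, p.2 ≠ w) :
    PySem.Dict.getD (l.foldl (fun d p => PySem.Dict.insert d p.2 p.1) d0) w 0 =
      PySem.Dict.getD d0 w 0 := by
  induction l generalizing d0 with
  | nil => rfl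
  | cons p t ih =>
    rw [List.foldl_cons, ih _ (fun q hq => h q (List.mem_cons_of_mem _ hq)),
      PySem.Dict.getD_insert, if_neg (fun he => h p List.mem_cons_self (Eq.symm he))]

lemma dict_getD_enum (ws : List Int) (hnd : ws.Nodup) :
    ∀ (s : Int) (d0 : PySem.Dict Int Int) (w : Int), w ∈ ws →
    PySem.Dict.getD
      ((PySem.List.enumerate ws s).foldl (fun d p => PySem.Dict.insert d p.2 p.1) d0) w 0 =
      s + (List.idxOf w ws : Int) := by
  induction ws with
  | nil => intro s d0 w hw; simp at hw
  | cons a tl ih =>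
    intro s d0 w hw
    obtain ⟨hna, hnd'⟩ := List.nodup_cons.mp hnd
    rw [PySem.List.enumerate_cons, List.foldl_cons]
    by_cases hwa : w = a
    · subst hwa
      rw [dict_fold_pres _ _ _ (fun p hp => by
        obtain ⟨k, hk, rfl⟩ := (PySem.List.mem_enumerate_iff tl (s+1) p).mp hp
        intro he
        exact hna (he ▸ List.getElem_mem hk))]
      rw [PySem.Dict.getD_insert, if_pos rfl, List.idxOf_cons_self]
      simp
    · have hwtl : w ∈ tl := by
        rcases List.mem_cons.mp hw with rfl | h'
        · exact absurd rfl hwa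
        · exact h'
      rw [ih hnd' (s+1) _ w hwtl, List.idxOf_cons_ne _ (fun he => hwa he.symm)]
      push_cast
      omega

lemma rank_lt_iff (ws : List Int) (hs : ws.Pairwise (· < ·)) (w1 w2 : Int)
    (h1 : w1 ∈ ws) (h2 : w2 ∈ ws) :
    List.idxOf w1 ws < List.idxOf w2 ws ↔ w1 < w2 := by
  have hlt1 := List.idxOf_lt_length_of_mem h1
  have hlt2 := List.idxOf_lt_length_of_mem h2
  have hg1 := List.getElem_idxOf hlt1
  have hg2 := List.getElem_idxOf hlt2
  have hpw := List.pairwise_iff_getElem.mp hs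
  constructor
  · intro hlt
    have := hpw _ _ hlt1 hlt2 hlt
    rw [hg1, hg2] at this
    exact this
  · intro hlt
    rcases lt_trichotomy (List.idxOf w1 ws) (List.idxOf w2 ws) with h | h | h
    · exact h
    · exfalso
      have h12 : w1 = w2 := by
        rw [← hg1, ← hg2]; congr 1
      omega
    · exfalso
      have := hpw _ _ hlt2 hlt1 h
      rw [hg1, hg2] at this
      omega

-- ---- B-side fold characterisation ----

lemma bestFold (l : List (Int × Int × Int)) (w d init : Int) :
    l.foldl (fun best c => if c.1 < w ∧ c.2.1 < d ∧ best < c.2.2 then c.2.2 else best) init =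
      ((l.filter (fun c => decide (c.1 < w) && decide (c.2.1 < d))).map
        (fun c => c.2.2)).foldl max init := by
  induction l generalizing init with
  | nil => simp
  | cons a t ih =>
    simp only [List.foldl_cons, List.filter_cons]
    by_cases h1 : a.1 < w <;> by_cases h2 : a.2.1 < d
    · rw [show (if a.1 < w ∧ a.2.1 < d ∧ init < a.2.2 then a.2.2 else init) = max init a.2.2 by
        by_cases h3 : init < a.2.2
        · rw [if_pos ⟨h1, h2, h3⟩]; omega
        · rw [if_neg (by tauto)]; omega]
      rw [show (decide (a.1 < w) && decide (a.2.1 < d)) = true by simp [h1, h2]]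
      rw [if_pos rfl, List.map_cons, List.foldl_cons]
      exact ih _
    all_goals
      rw [show (if a.1 < w ∧ a.2.1 < d ∧ init < a.2.2 then a.2.2 else init) = init by
        rw [if_neg (by tauto)]]
    all_goals
      rw [show (decide (a.1 < w) && decide (a.2.1 < d)) = false by simp [h1, h2]]
    all_goals
      rw [show (if (false = true) then a :: List.filter (fun c => decide (c.1 < w) && decide (c.2.1 < d)) t else List.filter (fun c => decide (c.1 < w) && decide (c.2.1 < d)) t) = List.filter (fun c => decide (c.1 < w) && decide (c.2.1 < d)) t from if_neg (by simp)]
    all_goals exact ih _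

-- ---- main loop equivalence ----

def rnkI (ws : List Int) (w : Int) : Int := (List.idxOf w ws : Int) + 1

def evC (ws ds : List Int) (chains : List (Int × Int × Int)) : List (Int × Int × Int) :=
  chains.map (fun c => (rnkI ws c.1, rnkI ds c.2.1, c.2.2))

lemma maxIte (a b : Int) : max a b = if a < b then b else a := by
  by_cases h : a < b <;> simp [h] <;> omega

lemma zeroRow (l : List Int) (hz : ∀ v ∈ l, v = 0) (z : Int) :
    PySem.List.pyGetD l z 0 = 0 := by
  by_cases hr : PySem.Raise.InRange l.length z
  · exact hz _ (PySem.List.pyGetD_mem l 0 hr)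
  · exact PySem.List.pyGetD_of_none l z 0 ((PySem.List.pyGet?_eq_none_iff l z).mpr hr)

lemma main_loop (ws ds : List Int) (hws : ws.Pairwise (· < ·)) (hds : ds.Pairwise (· < ·))
    (w2id d2id : PySem.Dict Int Int)
    (hw2 : ∀ w ∈ ws, PySem.Dict.getD w2id w 0 = rnkI ws w)
    (hd2 : ∀ d ∈ ds, PySem.Dict.getD d2id d 0 = rnkI ds d)
    (n m : Int) (hn : n = (ws.length : Int)) (hm : m = (ds.length : Int)) :
    ∀ (L : List (List Int)) (tree : List (List Int)) (chains : List (Int × Int × Int)) (res : Int),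
    (∀ b ∈ L, PySem.List.pyGetD b 0 0 ∈ ws ∧ PySem.List.pyGetD b 1 0 ∈ ds) →
    (∀ c ∈ chains, c.1 ∈ ws ∧ c.2.1 ∈ ds) →
    TInv n m tree (evC ws ds chains) →
    TShape n m tree →
    (L.foldl (fun (st : List (List Int) × Int) b =>
        let w := PySem.List.pyGetD b 0 0
        let d := PySem.List.pyGetD b 1 0
        let h := PySem.List.pyGetD b 2 0
        let hsum := bitQuery st.1 (PySem.Dict.getD w2id w 0 - 1) (PySem.Dict.getD d2id d 0 - 1)
        (bitUpdateX st.1 n m (PySem.Dict.getD w2id w 0) (PySem.Dict.getD d2id d 0) (hsum + h),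
          max st.2 (hsum + h))) (tree, res)).2 =
    (L.foldl (fun (st : List (Int × Int × Int) × Int) b =>
        let w := PySem.List.pyGetD b 0 0
        let d := PySem.List.pyGetD b 1 0
        let h := PySem.List.pyGetD b 2 0
        let best := st.1.foldl
          (fun best c => if c.1 < w ∧ c.2.1 < d ∧ best < c.2.2 then c.2.2 else best) 0
        (st.1 ++ [(w, d, best + h)], if st.2 < best + h then best + h else st.2)) (chains, res)).2 := by
  intro L
  induction L with
  | nil => intro tree chains res _ _ _ _; rfl
  | cons b L' ih =>
    intro tree chains res hmemL hch hInv hSh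
    obtain ⟨⟨hbw, hbd⟩, hL'⟩ : (PySem.List.pyGetD b 0 0 ∈ ws ∧ PySem.List.pyGetD b 1 0 ∈ ds) ∧
        ∀ b' ∈ L', PySem.List.pyGetD b' 0 0 ∈ ws ∧ PySem.List.pyGetD b' 1 0 ∈ ds :=
      ⟨hmemL b List.mem_cons_self, fun b' hb' => hmemL b' (List.mem_cons_of_mem _ hb')⟩
    simp only [List.foldl_cons]
    set w := PySem.List.pyGetD b 0 0 with hwdef
    set d := PySem.List.pyGetD b 1 0 with hddef
    set h := PySem.List.pyGetD b 2 0 with hhdef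
    have hidw := List.idxOf_lt_length_of_mem hbw
    have hidd := List.idxOf_lt_length_of_mem hbd
    have hrw := hw2 w hbw
    have hrd := hd2 d hbd
    have hCb : ∀ e ∈ evC ws ds chains, 1 ≤ e.1 ∧ e.1 ≤ n ∧ 1 ≤ e.2.1 ∧ e.2.1 ≤ m := by
      intro e he
      obtain ⟨c, hc, rfl⟩ := List.mem_map.mp he
      obtain ⟨hc1, hc2⟩ := hch c hc
      have i1 := List.idxOf_lt_length_of_mem hc1
      have i2 := List.idxOf_lt_length_of_mem hc2
      unfold rnkI
      dsimp only
      omega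
    have hq : bitQuery tree (rnkI ws w - 1) (rnkI ds d - 1) =
        chains.foldl (fun best c => if c.1 < w ∧ c.2.1 < d ∧ best < c.2.2 then c.2.2 else best) 0 := by
      rw [query_val n m tree (evC ws ds chains) _ _ hInv hCb
        (by unfold rnkI; omega) (by unfold rnkI; omega)]
      rw [bestFold]
      unfold evC
      rw [List.filter_map, List.map_map]
      congr 1
      rw [List.filter_congr (fun c hc => ?_)]
      · rfl
      · obtain ⟨hc1, hc2⟩ := hch c hc
        have e1 : rnkI ws c.1 ≤ rnkI ws w - 1 ↔ c.1 < w := by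
          rw [← rank_lt_iff ws hws c.1 w hc1 hbw]
          unfold rnkI
          omega
        have e2 : rnkI ds c.2.1 ≤ rnkI ds d - 1 ↔ c.2.1 < d := by
          rw [← rank_lt_iff ds hds c.2.1 d hc2 hbd]
          unfold rnkI
          omega
        simp only [Function.comp_apply]
        rw [decide_eq_decide.mpr e1, decide_eq_decide.mpr e2]
    have hupd := TInv_update n m tree (evC ws ds chains) (rnkI ws w) (rnkI ds d)
      (bitQuery tree (rnkI ws w - 1) (rnkI ds d - 1) + h) hInv hSh
      (by unfold rnkI; omega) (by unfold rnkI; omega)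
    have hev : evC ws ds (chains ++ [(w, d,
        (chains.foldl (fun best c => if c.1 < w ∧ c.2.1 < d ∧ best < c.2.2 then c.2.2 else best) 0) + h)]) =
        evC ws ds chains ++ [(rnkI ws w, rnkI ds d,
          bitQuery tree (rnkI ws w - 1) (rnkI ds d - 1) + h)] := by
      unfold evC
      rw [List.map_append, hq]
      rfl
    have hch' : ∀ c ∈ chains ++ [(w, d,
        (chains.foldl (fun best c => if c.1 < w ∧ c.2.1 < d ∧ best < c.2.2 then c.2.2 else best) 0) + h)],
        c.1 ∈ ws ∧ c.2.1 ∈ ds := by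
      intro c hc
      rcases List.mem_append.mp hc with hc' | hc'
      · exact hch c hc'
      · rcases List.mem_singleton.mp hc' with rfl
        exact ⟨hbw, hbd⟩
    have goal := ih (bitUpdateX tree n m (rnkI ws w) (rnkI ds d)
        (bitQuery tree (rnkI ws w - 1) (rnkI ds d - 1) + h))
      (chains ++ [(w, d,
        (chains.foldl (fun best c => if c.1 < w ∧ c.2.1 < d ∧ best < c.2.2 then c.2.2 else best) 0) + h)])
      (max res (bitQuery tree (rnkI ws w - 1) (rnkI ds d - 1) + h))
      hL' hch' (by rw [hev]; exact hupd.1) hupd.2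
    rw [hq] at goal
    simp only [hrw, hrd]
    rw [hq]
    rw [show (if res < chains.foldl (fun best c => if c.1 < w ∧ c.2.1 < d ∧ best < c.2.2 then c.2.2 else best) 0 + h
        then chains.foldl (fun best c => if c.1 < w ∧ c.2.1 < d ∧ best < c.2.2 then c.2.2 else best) 0 + h
        else res) =
      max res (chains.foldl (fun best c => if c.1 < w ∧ c.2.1 < d ∧ best < c.2.2 then c.2.2 else best) 0 + h) from
      (maxIte _ _).symm]
    exact goal

-- ===== VERDICT (by name: the statement is the Claim_ definition above) =====
theorem pileBox_spec : Claim_equal_pileBox := by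
  intro box hdom hpre
  unfold Spec_pileBox pileBox pileBox_alt
  dsimp only
  set sbox := PySem.List.sorted box tkey false with hsbox
  set ws := PySem.List.sorted (PySem.Set.ofList (sbox.map (fun b => PySem.List.pyGetD b 0 0)))
    (fun x => x) false with hws0
  set ds := PySem.List.sorted (PySem.Set.ofList (sbox.map (fun b => PySem.List.pyGetD b 1 0)))
    (fun x => x) false with hds0
  have hwsp : ws.Pairwise (· < ·) := PySem.List.sorted_ofList_pairwise_lt _
  have hdsp : ds.Pairwise (· < ·) := PySem.List.sorted_ofList_pairwise_lt _
  have hwnd : ws.Nodup := hwsp.nodup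
  have hdnd : ds.Nodup := hdsp.nodup
  apply main_loop ws ds hwsp hdsp _ _
    (fun w hw => by rw [dict_getD_enum ws hwnd 1 _ w hw]; unfold rnkI; omega)
    (fun d hd => by rw [dict_getD_enum ds hdnd 1 _ d hd]; unfold rnkI; omega)
    ((ws.length : Int)) ((ds.length : Int)) rfl rfl sbox
  · intro b hb
    constructor
    · rw [hws0, PySem.List.mem_sorted, PySem.Set.mem_ofList]
      exact List.mem_map_of_mem hb
    · rw [hds0, PySem.List.mem_sorted, PySem.Set.mem_ofList]
      exact List.mem_map_of_mem hb
  · intro c hc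
    simp at hc
  · intro x y hx hy
    have hz : cellI ((PySem.List.pyRange 0 ((ws.length : Int) + 1) 1).map
        (fun _ => PySem.List.pyRepeat [(0:Int)] ((ds.length : Int) + 1))) x y = 0 := by
      unfold cellI
      apply zeroRow
      intro v hv
      by_cases hr : PySem.Raise.InRange ((PySem.List.pyRange 0 ((ws.length : Int) + 1) 1).map
          (fun _ => PySem.List.pyRepeat [(0:Int)] ((ds.length : Int) + 1))).length x
      · have hrow := PySem.List.pyGetD_mem ((PySem.List.pyRange 0 ((ws.length : Int) + 1) 1).map
          (fun _ => PySem.List.pyRepeat [(0:Int)] ((ds.length : Int) + 1))) ([] : List Int) hr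
        obtain ⟨_, _, hrow'⟩ := List.mem_map.mp hrow
        rw [← hrow', PySem.List.pyRepeat_singleton] at hv
        exact List.eq_of_mem_replicate hv
      · rw [PySem.List.pyGetD_of_none _ _ _ ((PySem.List.pyGet?_eq_none_iff _ _).mpr hr)] at hv
        simp at hv
    rw [hz]
    unfold evC touchVals
    simp
  · constructor
    · rw [List.length_map]
      rw [show ((ws.length : Int) + 1) = ((ws.length + 1 : Nat) : Int) by push_cast; ring,
        PySem.List.pyRange_zero_natCast, List.length_map, List.length_range]
    · intro row hrow
      obtain ⟨_, _, hrow'⟩ := List.mem_map.mp hrow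
      rw [← hrow', PySem.List.pyRepeat_singleton, List.length_replicate]
      omega
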